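-- pv_equiv track=rewrite | github.com/txperl/JustList | app/lib/core/onedrive/onedrive.py | drivePath
-- ===== SOURCE A (Python) =====
-- def drivePath(path):
--     path = str(path).strip(":").split(":", 1)[-1]
--     while "//" in path:
--         path = str(path).replace("//", "/")
--     if path == "/":
--         return path
--     else:
--         return str(":/{}:").format(str(path).strip("/"))
-- ===== SOURCE B (Python) =====
-- def drivePath(path):
--     path = str(path).strip(":").split(":", 1)[-1]
--     parts = [p for p in path.split("/") if p]
--     normalized = "/".join(parts)
--     if not normalized and "/" in path:
--         return "/"
--     return ":/{}:".format(normalized)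
-- ===== Notes on version B (the rewrite author's own statement) =====
-- stated objective: simpler
-- what changed: Replaces A's repeated whole-string replace('//','/') fixpoint loop plus final strip('/') by a single split on '/', a filter of the non-empty segments and one join, distinguishing the all-slash case ('/' result) from the empty case by a membership test.
import Mathlib
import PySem

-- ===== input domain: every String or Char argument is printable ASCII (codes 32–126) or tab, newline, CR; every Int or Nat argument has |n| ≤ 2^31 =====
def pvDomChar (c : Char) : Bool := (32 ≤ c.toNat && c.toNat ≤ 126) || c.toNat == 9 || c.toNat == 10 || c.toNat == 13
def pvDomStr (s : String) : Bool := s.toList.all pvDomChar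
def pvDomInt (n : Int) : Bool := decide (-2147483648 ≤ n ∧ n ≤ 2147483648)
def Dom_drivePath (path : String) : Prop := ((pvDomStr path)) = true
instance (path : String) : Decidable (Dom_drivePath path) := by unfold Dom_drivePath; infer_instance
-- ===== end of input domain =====

-- B replaces A's repeated replace("//","/") fixpoint loop (plus final strip("/")) by a single
-- split on '/', filtering out empty segments and joining once; objective: simpler.


-- ===== PORT A =====
-- shared first line of both Pythons: path = str(path).strip(":").split(":", 1)[-1]
def firstColonSplit (path : String) : String :=
  (PySem.List.pyGet? ((PySem.Str.splitMax? (PySem.Str.stripChars path ":") ":" 1).getD []) (-1)).getD ""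

-- structural model of one pass of s.replace("//", "/"); it and the next four lemmas are
-- cited by the while-loop's termination proof below
def repSlash : List Char → List Char
  | [] => []
  | [c] => [c]
  | c :: d :: t => if c = '/' ∧ d = '/' then '/' :: repSlash t else c :: repSlash (d :: t)

theorem replaceGo_eq : ∀ (fuel : Nat) (l acc : List Char), l.length ≤ fuel →
    PySem.Chars.replace.go ['/', '/'] ['/'] fuel l acc = acc.reverse ++ repSlash l := by
  intro fuel
  induction fuel with
  | zero =>
    intro l acc h
    have : l = [] := List.eq_nil_of_length_eq_zero (Nat.le_zero.mp h)
    subst this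
    simp [PySem.Chars.replace.go, repSlash]
  | succ n ih =>
    intro l acc h
    match l with
    | [] => simp [PySem.Chars.replace.go, repSlash]
    | [c] =>
      rw [PySem.Chars.replace.go]
      have hpre : List.isPrefixOf ['/', '/'] [c] = false := by
        simp [List.isPrefixOf]
      simp only [hpre]
      rw [ih [] (c :: acc) (by simp)]
      simp [repSlash]
    | c :: d :: t =>
      rw [PySem.Chars.replace.go]
      by_cases hc : c = '/' ∧ d = '/'
      · obtain ⟨hc1, hc2⟩ := hc
        subst hc1; subst hc2
        have hpre : List.isPrefixOf ['/', '/'] ('/' :: '/' :: t) = true := by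
          simp [List.isPrefixOf]
        simp only [hpre, if_pos, List.reverse_cons, List.reverse_nil, List.nil_append,
          List.drop_succ_cons, List.drop_zero, List.length_cons]
        rw [show List.drop ([] : List Char).length t = t from rfl]
        rw [show (['/'] ++ acc : List Char) = '/' :: acc from rfl]
        rw [ih t (('/' : Char) :: acc) (by simp at h ⊢; omega)]
        simp [repSlash]
      · have hpre : List.isPrefixOf ['/', '/'] (c :: d :: t) = false := by
          simp only [List.isPrefixOf, Bool.and_eq_false_iff]
          rcases (not_and_or.mp hc) with h1 | h1
          · left; simp; exact fun e => h1 e.symm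
          · right; left; simp; exact fun e => h1 e.symm
        simp only [hpre]
        rw [ih (d :: t) (c :: acc) (by simp at h ⊢; omega)]
        simp [repSlash, hc]

theorem replace_slash_eq (s : List Char) :
    PySem.Chars.replace s ['/', '/'] ['/'] = repSlash s := by
  rw [PySem.Chars.replace]
  simp only [List.isEmpty_cons, if_false, Bool.false_eq_true]
  exact replaceGo_eq s.length s [] (le_refl _)

theorem repSlash_length_le (s : List Char) : (repSlash s).length ≤ s.length := by
  fun_induction repSlash with
  | case1 => simp
  | case2 c => simp
  | case3 c d t h ih => simp [repSlash, h]; omega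
  | case4 c d t h ih => simp [repSlash, h] at ih ⊢; omega

theorem repSlash_length_lt (s : List Char) (h : ['/', '/'] <:+: s) :
    (repSlash s).length < s.length := by
  induction s with
  | nil => simp at h
  | cons c t ih =>
    rcases List.infix_cons_iff.mp h with hp | hi
    · match t, hp with
      | d :: t', hp =>
        have hc : c = '/' ∧ d = '/' := by
          rcases hp with ⟨r, hr⟩
          simp at hr
          exact ⟨hr.1.symm, hr.2.1.symm⟩
        rw [show repSlash (c :: d :: t') = '/' :: repSlash t' by simp [repSlash, hc]]
        have := repSlash_length_le t'
        simp; omega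
    · cases t with
      | nil => simp [List.infix_iff_prefix_suffix] at hi
      | cons d t' =>
        by_cases hc : c = '/' ∧ d = '/'
        · rw [show repSlash (c :: d :: t') = '/' :: repSlash t' by simp [repSlash, hc]]
          have := repSlash_length_le t'
          simp; omega
        · rw [show repSlash (c :: d :: t') = c :: repSlash (d :: t') by simp [repSlash, hc]]
          have := ih hi
          simp at this ⊢; omega

def collapseSlashes (s : String) : String :=
  if h : PySem.Str.isIn "//" s then collapseSlashes (PySem.Str.replace s "//" "/") else s
  termination_by s.toList.length
  decreasing_by
    rw [PySem.Str.isIn_eq, PySem.Chars.isIn_iff_infix] at h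
    rw [PySem.Str.toList_replace]
    have h1 : ("//" : String).toList = ['/', '/'] := rfl
    rw [h1]
    have h2 : ("/" : String).toList = ['/'] := rfl
    rw [h2, replace_slash_eq]
    exact repSlash_length_lt _ h

def drivePath (path : String) : String :=
  let p := firstColonSplit path
  let p := collapseSlashes p
  if p = "/" then p
  else ":/" ++ PySem.Str.stripChars p "/" ++ ":"  -- ":/{}:".format(x): exact hand-port of format

-- ===== PORT B =====
def drivePath_alt (path : String) : String :=
  let p := firstColonSplit path
  let parts := ((PySem.Str.split? p "/").getD []).filter (fun seg => seg ≠ "")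
  let normalized := PySem.Str.join "/" parts
  if normalized = "" ∧ PySem.Str.isIn "/" p then "/"
  else ":/" ++ normalized ++ ":"  -- ":/{}:".format(normalized): exact hand-port of format

-- ===== PRECONDITION & SPEC =====
def Spec_drivePath (path : String) (out : String) : Prop := out = drivePath_alt path
instance (path : String) (out : String) : Decidable (Spec_drivePath path out) := by unfold Spec_drivePath; infer_instance

-- ===== CLAIM (what is proved, stated in full; the proofs are below) =====
def Claim_equal_drivePath : Prop := ∀ (path : String), Dom_drivePath path → Spec_drivePath path (drivePath path)

-- ===== LEMMAS AND PROOFS =====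
def segs1 : List Char → List Char → List (List Char)
  | cur, [] => [cur]
  | cur, c :: t => if c = '/' then cur :: segs1 [] t else segs1 (cur ++ [c]) t

def partsOf (s : List Char) : List (List Char) := (segs1 [] s).filter (· ≠ [])

theorem splitOnGo_eq : ∀ (fuel : Nat) (l cur : List Char) (acc : List (List Char)),
    l.length < fuel →
    PySem.Chars.splitOn.go ['/'] fuel l cur acc = acc.reverse ++ segs1 cur.reverse l := by
  intro fuel
  induction fuel with
  | zero => intro l cur acc h; omega
  | succ n ih =>
    intro l cur acc h
    match l with
    | [] => simp [PySem.Chars.splitOn.go, segs1]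
    | c :: t =>
      rw [PySem.Chars.splitOn.go]
      by_cases hc : c = '/'
      · subst hc
        have hpre : List.isPrefixOf ['/'] ('/' :: t) = true := by simp [List.isPrefixOf]
        simp only [hpre, if_pos]
        rw [show List.drop (['/'] : List Char).length ('/' :: t) = t from rfl]
        rw [ih t [] (cur.reverse :: acc) (by simp at h ⊢; omega)]
        simp [segs1]
      · have hpre : List.isPrefixOf ['/'] (c :: t) = false := by
          simp [List.isPrefixOf]; exact fun e => hc e.symm
        simp only [hpre]
        rw [ih t (c :: cur) acc (by simp at h ⊢; omega)]
        simp [segs1, hc]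

theorem splitOn_slash (s : List Char) : PySem.Chars.splitOn s ['/'] = segs1 [] s := by
  rw [PySem.Chars.splitOn]
  rw [splitOnGo_eq (s.length + 1) s [] [] (by omega)]
  simp

theorem segs1_acc (s : List Char) : ∀ cur : List Char,
    segs1 cur s = (cur ++ (segs1 [] s).headI) :: (segs1 [] s).tail := by
  induction s with
  | nil => intro cur; simp [segs1]
  | cons c t ih =>
    intro cur
    by_cases hc : c = '/'
    · subst hc; simp [segs1]
    · rw [show segs1 cur (c :: t) = segs1 (cur ++ [c]) t by simp [segs1, hc]]
      rw [show segs1 [] (c :: t) = segs1 [c] t by simp [segs1, hc]]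
      rw [ih (cur ++ [c]), ih [c]]
      simp

theorem segs1_shape (s : List Char) : ∃ e r, segs1 [] s = e :: r := by
  rw [segs1_acc s []]
  exact ⟨_, _, rfl⟩

theorem mem_segs1_no_slash (s : List Char) :
    ∀ (cur : List Char), '/' ∉ cur → ∀ e ∈ segs1 cur s, '/' ∉ e := by
  induction s with
  | nil => intro cur hcur e he; simp [segs1] at he; subst he; exact hcur
  | cons c t ih =>
    intro cur hcur e he
    by_cases hc : c = '/'
    · subst hc
      rw [show segs1 cur ('/' :: t) = cur :: segs1 [] t by simp [segs1]] at he
      rcases List.mem_cons.mp he with he | he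
      · subst he; exact hcur
      · exact ih [] (by simp) e he
    · rw [show segs1 cur (c :: t) = segs1 (cur ++ [c]) t by simp [segs1, hc]] at he
      refine ih (cur ++ [c]) ?_ e he
      simp [hcur]; exact fun e => hc e.symm

theorem parts_cons_slash (t : List Char) : partsOf ('/' :: t) = partsOf t := by
  simp [partsOf, segs1]

theorem parts_dropWhile_slash (t : List Char) :
    partsOf (t.dropWhile (· == '/')) = partsOf t := by
  induction t with
  | nil => rfl
  | cons c t ih =>
    by_cases hc : c = '/'
    · subst hc
      rw [show List.dropWhile (· == '/') ('/' :: t) = List.dropWhile (· == '/') t by simp]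
      rw [ih, parts_cons_slash]
    · rw [List.dropWhile_cons_of_neg (by simp [hc])]

theorem parts_nil_iff (s : List Char) : partsOf s = [] ↔ ∀ c ∈ s, c = '/' := by
  induction s with
  | nil => simp [partsOf, segs1]
  | cons c t ih =>
    by_cases hc : c = '/'
    · subst hc; rw [parts_cons_slash]; simp [ih]
    · constructor
      · intro h
        exfalso
        obtain ⟨e, r, he⟩ := segs1_shape t
        have : partsOf (c :: t) = ((c :: e) :: r).filter (· ≠ []) := by
          rw [partsOf, show segs1 ([] : List Char) (c :: t) = segs1 [c] t by simp [segs1, hc],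
            segs1_acc t [c], he]
          simp [he]
        rw [this] at h
        simp [List.filter] at h
      · intro h; exact absurd (h c (by simp)) hc

def col : List Char → List Char
  | [] => []
  | c :: t =>
    if c = '/' then '/' :: col (t.dropWhile (· == '/')) else c :: col t
  termination_by s => s.length
  decreasing_by
    · exact Nat.lt_succ_of_le (List.length_dropWhile_le _ _)
    · exact Nat.lt_succ_self _

theorem rep_cons_ne (c : Char) (t : List Char) (h : c ≠ '/') :
    repSlash (c :: t) = c :: repSlash t := by
  match t with
  | [] => simp [repSlash]
  | d :: t' =>
    have hn : ¬ (c = '/' ∧ d = '/') := fun hh => h hh.1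
    simp [repSlash, hn]

theorem rep_head (u : List Char) (h : u.head? ≠ some '/') :
    (repSlash u).head? ≠ some '/' := by
  match u with
  | [] => simp [repSlash]
  | c :: t =>
    have hc : c ≠ '/' := by simp at h; exact h
    rw [rep_cons_ne c t hc]
    simpa using h

theorem rep_run : ∀ (k : Nat) (u : List Char), u.head? ≠ some '/' →
    repSlash (List.replicate k '/' ++ u) = List.replicate ((k + 1) / 2) '/' ++ repSlash u := by
  intro k
  induction k using Nat.strong_induction_on with
  | _ k ih =>
    intro u hu
    match k with
    | 0 => simp
    | 1 =>
      simp only [List.replicate_succ, List.replicate_zero, List.nil_append, List.cons_append]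
      match u with
      | [] => simp [repSlash]
      | c :: t =>
        have hc : c ≠ '/' := by simp at hu; exact hu
        have hn : ¬ (('/' : Char) = '/' ∧ c = '/') := fun hh => hc hh.2
        rw [show repSlash ('/' :: c :: t) = '/' :: repSlash (c :: t) by simp [repSlash, hn, hc]]
    | (m + 2) =>
      rw [show List.replicate (m + 2) '/' ++ u = '/' :: '/' :: (List.replicate m '/' ++ u) by
        simp [List.replicate_succ]]
      rw [show repSlash ('/' :: '/' :: (List.replicate m '/' ++ u)) =
          '/' :: repSlash (List.replicate m '/' ++ u) by simp [repSlash]]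
      rw [ih m (by omega) u hu]
      rw [show (m + 2 + 1) / 2 = (m + 1) / 2 + 1 by omega]
      simp [List.replicate_succ]

theorem dropWhile_slash_eq_self (u : List Char) (h : u.head? ≠ some '/') :
    List.dropWhile (· == '/') u = u := by
  match u with
  | [] => rfl
  | c :: t =>
    have hc : c ≠ '/' := by simp at h; exact h
    rw [List.dropWhile_cons_of_neg (by simp [hc])]

theorem col_run (k : Nat) (u : List Char) (h : u.head? ≠ some '/') (hk : 1 ≤ k) :
    col (List.replicate k '/' ++ u) = '/' :: col u := by
  match k with
  | m + 1 =>
    rw [show List.replicate (m + 1) '/' ++ u = '/' :: (List.replicate m '/' ++ u) by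
      simp [List.replicate_succ]]
    rw [show col ('/' :: (List.replicate m '/' ++ u)) =
        '/' :: col (List.dropWhile (· == '/') (List.replicate m '/' ++ u)) by simp [col]]
    congr 1
    congr 1
    rw [List.dropWhile_append]
    simp [dropWhile_slash_eq_self u h]

theorem col_cons_ne (c : Char) (t : List Char) (h : c ≠ '/') :
    col (c :: t) = c :: col t := by
  simp [col, h]

theorem col_rep_aux : ∀ (n : Nat) (s : List Char), s.length ≤ n → col (repSlash s) = col s := by
  intro n
  induction n with
  | zero =>
    intro s h
    have : s = [] := List.eq_nil_of_length_eq_zero (Nat.le_zero.mp h)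
    subst this; rfl
  | succ n ih =>
    intro s h
    match s with
    | [] => rfl
    | c :: t =>
      by_cases hc : c = '/'
      · subst hc
        -- decompose the leading slash run
        set u := List.dropWhile (· == '/') t with hu
        have hhead : u.head? ≠ some '/' := by
          rw [hu]
          cases ht : List.dropWhile (· == '/') t with
          | nil => simp
          | cons d v =>
            have h2 := List.head?_dropWhile_not (· == '/') t
            rw [ht] at h2
            simp at h2 ⊢
            exact h2
        set k := (List.takeWhile (· == '/') t).length + 1 with hk
        have hdec : '/' :: t = List.replicate k '/' ++ u := by
          have htw : List.takeWhile (· == '/') t = List.replicate (List.takeWhile (· == '/') t).length '/' := by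
            apply List.eq_replicate_of_mem
            intro b hb
            simpa using List.mem_takeWhile_imp hb
          calc '/' :: t = '/' :: (List.takeWhile (· == '/') t ++ u) := by
                rw [hu, List.takeWhile_append_dropWhile]
            _ = List.replicate k '/' ++ u := by
                rw [hk, List.replicate_succ, List.cons_append]; rw [← htw]
        have hulen : u.length ≤ n := by
          have h1 : u.length + k = ('/' :: t).length := by
            rw [hdec]; simp; omega
          simp at h1 h ⊢; omega
        rw [hdec, rep_run k u hhead, col_run _ _ (rep_head u hhead) (by omega),
          col_run _ _ hhead (by omega), ih u hulen]
      · rw [rep_cons_ne c t hc, col_cons_ne c _ hc, col_cons_ne c _ hc,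
          ih t (by simp at h; omega)]

theorem col_rep (s : List Char) : col (repSlash s) = col s :=
  col_rep_aux s.length s (le_refl _)

theorem col_nil : col [] = [] := by simp [col]

theorem col_no_dbl (s : List Char) (h : ¬ ['/', '/'] <:+: s) : col s = s := by
  induction s with
  | nil => exact col_nil
  | cons c t ih =>
    by_cases hc : c = '/'
    · subst hc
      have ht : t.head? ≠ some '/' := by
        cases t with
        | nil => simp
        | cons d v =>
          simp only [List.head?_cons]
          intro he
          simp only [Option.some_inj] at he
          exact h (by rw [he]; exact ⟨[], v, by simp⟩)
      rw [show col ('/' :: t) = '/' :: col (t.dropWhile (· == '/')) by simp [col]]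
      rw [dropWhile_slash_eq_self t ht]
      rw [ih (fun hi => h (List.infix_cons hi))]
    · rw [col_cons_ne c t hc, ih (fun hi => h (List.infix_cons hi))]

theorem collapse_aux : ∀ (n : Nat) (q : String), q.toList.length ≤ n →
    (collapseSlashes q).toList = col q.toList := by
  intro n
  induction n with
  | zero =>
    intro q h
    have h0 : q.toList = [] := List.eq_nil_of_length_eq_zero (Nat.le_zero.mp h)
    rw [collapseSlashes]
    have : PySem.Str.isIn "//" q = false := by
      rw [PySem.Str.isIn_eq]
      apply (PySem.Chars.isIn_eq_false_iff _ _).mpr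
      rw [h0]
      intro hi
      have := List.eq_nil_of_infix_nil hi
      simp at this
    simp only [this]
    simp [h0, col_nil]
  | succ n ih =>
    intro q h
    rw [collapseSlashes]
    by_cases hin : PySem.Str.isIn "//" q
    · simp only [hin, dite_true]
      have hinf : ['/', '/'] <:+: q.toList := by
        rw [PySem.Str.isIn_eq, PySem.Chars.isIn_iff_infix] at hin
        exact hin
      have hlt : (PySem.Str.replace q "//" "/").toList.length ≤ n := by
        rw [PySem.Str.toList_replace,
          show ("//" : String).toList = ['/', '/'] from rfl,
          show ("/" : String).toList = ['/'] from rfl, replace_slash_eq]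
        have := repSlash_length_lt _ hinf
        omega
      rw [ih _ hlt]
      rw [PySem.Str.toList_replace,
        show ("//" : String).toList = ['/', '/'] from rfl,
        show ("/" : String).toList = ['/'] from rfl, replace_slash_eq]
      exact col_rep _
    · simp only [Bool.not_eq_true] at hin
      simp only [hin]
      rw [col_no_dbl]
      · simp
      · rw [PySem.Str.isIn_eq] at hin
        exact (PySem.Chars.isIn_eq_false_iff _ _).mp hin

theorem collapse_toList (q : String) : (collapseSlashes q).toList = col q.toList :=
  collapse_aux q.toList.length q (le_refl _)

def joinSl (ps : List (List Char)) : List Char := List.intercalate ['/'] ps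

def leadSl (s : List Char) : List Char := if s.head? = some '/' then ['/'] else []

def trailSl (s : List Char) : List Char :=
  if partsOf s ≠ [] ∧ s.getLast? = some '/' then ['/'] else []

def Pform (s : List Char) : List Char := leadSl s ++ joinSl (partsOf s) ++ trailSl s

theorem joinSl_nil : joinSl [] = [] := by simp [joinSl, List.intercalate]

theorem joinSl_single (e : List Char) : joinSl [e] = e := by simp [joinSl, List.intercalate]

theorem joinSl_cons_cons (a b : List Char) (r : List (List Char)) :
    joinSl (a :: b :: r) = a ++ '/' :: joinSl (b :: r) := by
  simp [joinSl, List.intercalate, List.intersperse]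

theorem joinSl_ne_nil (e : List Char) (he : e ≠ []) (r : List (List Char)) :
    joinSl (e :: r) ≠ [] := by
  cases r with
  | nil => rw [joinSl_single]; exact he
  | cons b r => rw [joinSl_cons_cons]; simp [he]

theorem joinSl_head (e : List Char) (he : e ≠ []) (r : List (List Char)) :
    (joinSl (e :: r)).head? = e.head? := by
  cases r with
  | nil => rw [joinSl_single]
  | cons b r => rw [joinSl_cons_cons]; exact List.head?_append_of_ne_nil e he

theorem getLast?_cons_ne_nil (c : Char) (l : List Char) (h : l ≠ []) :
    (c :: l).getLast? = l.getLast? := by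
  cases l with
  | nil => exact absurd rfl h
  | cons b r => exact List.getLast?_cons_cons

theorem joinSl_getLast (ps : List (List Char)) (hp : ∀ e ∈ ps, e ≠ [] ∧ '/' ∉ e) :
    ∀ x, (joinSl ps).getLast? = some x → x ≠ '/' := by
  induction ps with
  | nil => intro x hx; rw [joinSl_nil] at hx; simp at hx
  | cons e r ih =>
    intro x hx
    cases r with
    | nil =>
      rw [joinSl_single] at hx
      intro he; subst he
      exact (hp e (by simp)).2 (List.mem_of_getLast? hx)
    | cons f r' =>
      rw [joinSl_cons_cons] at hx
      have hf : f ≠ [] := (hp f (by simp)).1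
      have hne : joinSl (f :: r') ≠ [] := joinSl_ne_nil f hf r'
      rw [List.getLast?_append, getLast?_cons_ne_nil '/' _ hne] at hx
      obtain ⟨y, hy⟩ := Option.ne_none_iff_exists'.mp
        (show (joinSl (f :: r')).getLast? ≠ none by
          simp only [ne_eq, List.getLast?_eq_none_iff]; exact hne)
      rw [hy] at hx
      simp only [Option.some_or, Option.some_inj] at hx
      subst hx
      exact ih (fun e' he' => hp e' (by simp [he'])) y hy

theorem parts_mem (s : List Char) (x : List Char) (hx : x ∈ partsOf s) : x ≠ [] ∧ '/' ∉ x := by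
  rw [partsOf] at hx
  have h1 := List.of_mem_filter hx
  have h2 := List.mem_of_mem_filter hx
  refine ⟨by simpa using h1, mem_segs1_no_slash s [] (by simp) x h2⟩

theorem strip_decor (L J T : List Char) (hL : ∀ x ∈ L, x = '/') (hT : ∀ x ∈ T, x = '/')
    (hh : ∀ x, J.head? = some x → x ≠ '/') (hl : ∀ x, J.getLast? = some x → x ≠ '/') :
    PySem.Chars.stripChars (L ++ J ++ T) ['/'] = J := by
  rw [PySem.Chars.stripChars]
  have hcontains : ∀ c : Char, (['/'] : List Char).contains c = decide (c = '/') := by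
    intro c
    by_cases h : c = '/' <;> simp [h]
  have hdropL : ∀ (l m : List Char), (∀ x ∈ l, x = '/') →
      List.dropWhile (fun c => (['/'] : List Char).contains c) (l ++ m) =
      List.dropWhile (fun c => (['/'] : List Char).contains c) m := by
    intro l m hall
    have h0 : List.dropWhile (fun c => (['/'] : List Char).contains c) l = [] := by
      rw [List.dropWhile_eq_nil_iff]
      intro x hxl
      rw [hcontains, hall x hxl]; simp
    rw [List.dropWhile_append, h0]
    simp
  have hdropT : List.dropWhile (fun c => (['/'] : List Char).contains c) T.reverse = [] := by
    rw [List.dropWhile_eq_nil_iff]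
    intro x hxl
    rw [hcontains, hT x (by simpa using hxl)]; simp
  cases hJ : J with
  | nil =>
    rw [show (L ++ ([] : List Char) ++ T) = L ++ T by simp, hdropL L T hL]
    rw [show List.dropWhile (fun c => (['/'] : List Char).contains c) T = [] from by
      rw [List.dropWhile_eq_nil_iff]; intro x hxl; rw [hcontains, hT x hxl]; simp]
    simp
  | cons j0 J' =>
    have hj0 : j0 ≠ '/' := hh j0 (by rw [hJ]; rfl)
    rw [List.append_assoc, hdropL L _ hL,
      show ((j0 :: J') ++ T : List Char) = j0 :: (J' ++ T) from rfl,
      List.dropWhile_cons_of_neg (by rw [hcontains]; simp [hj0]),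
      show (j0 :: (J' ++ T)).reverse = T.reverse ++ (j0 :: J').reverse by simp,
      hdropL T.reverse _ (fun x hx => hT x (by simpa using hx))]
    cases hr : (j0 :: J').reverse with
    | nil => simp at hr
    | cons y rest =>
      have hy : (j0 :: J').getLast? = some y := by rw [← List.head?_reverse, hr]; rfl
      have hyne : y ≠ '/' := hl y (by rw [hJ]; exact hy)
      rw [List.dropWhile_cons_of_neg (by rw [hcontains]; simp [hyne]),
        ← hr, List.reverse_reverse]

theorem segs1_cons_ne (c : Char) (t : List Char) (h : c ≠ '/') :
    segs1 [] (c :: t) = (c :: (segs1 [] t).headI) :: (segs1 [] t).tail := by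
  rw [show segs1 [] (c :: t) = segs1 [c] t by simp [segs1, h], segs1_acc t [c]]
  simp

theorem parts_cons_ne_slashhead (c : Char) (u : List Char) (h : c ≠ '/') :
    partsOf (c :: '/' :: u) = [c] :: partsOf u := by
  rw [partsOf, show segs1 [] (c :: '/' :: u) = segs1 [c] ('/' :: u) by simp [segs1, h],
    show segs1 [c] ('/' :: u) = [c] :: segs1 [] u by simp [segs1]]
  simp [partsOf]

theorem slashOnly_last (u : List Char) (h : ∀ x ∈ u, x = '/') :
    ('/' :: u).getLast? = some '/' := by
  induction u with
  | nil => rfl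
  | cons d v ih =>
    rw [List.getLast?_cons_cons, h d (by simp)]
    exact ih (fun x hx => h x (by simp [hx]))

theorem joinSl_cons_head (c : Char) (x : List Char) (r : List (List Char)) :
    joinSl ((c :: x) :: r) = c :: joinSl (x :: r) := by
  cases r with
  | nil => rw [joinSl_single, joinSl_single]
  | cons b r' => rw [joinSl_cons_cons, joinSl_cons_cons]; simp

theorem Pform_nil : Pform [] = [] := by
  simp [Pform, leadSl, trailSl, partsOf, segs1, joinSl, List.intercalate]

theorem P_cons_ne (c : Char) (t : List Char) (h : c ≠ '/') :
    Pform (c :: t) = c :: Pform t := by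
  cases t with
  | nil =>
    simp [Pform, leadSl, trailSl, partsOf, segs1, h, joinSl, List.intercalate]
  | cons d u =>
    by_cases hd : d = '/'
    · subst hd
      by_cases hpu : partsOf u = []
      · have hall : ∀ x ∈ u, x = '/' := (parts_nil_iff u).mp hpu
        have hlast : ('/' :: u).getLast? = some '/' := slashOnly_last u hall
        simp [Pform, leadSl, trailSl, parts_cons_ne_slashhead c u h, parts_cons_slash,
          hpu, h, joinSl_single, joinSl_nil, List.getLast?_cons_cons, hlast]
      · obtain ⟨e0, r0, hp0⟩ := List.exists_cons_of_ne_nil hpu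
        have htr : trailSl (c :: '/' :: u) = trailSl ('/' :: u) := by
          simp [trailSl, parts_cons_ne_slashhead c u h, parts_cons_slash, hp0,
            List.getLast?_cons_cons]
        rw [Pform, Pform, parts_cons_ne_slashhead c u h, parts_cons_slash, hp0, htr,
          joinSl_cons_cons [c] e0 r0]
        simp [leadSl, h]
    · have h1 : segs1 [] (c :: d :: u) =
          (c :: d :: (segs1 [] u).headI) :: (segs1 [] u).tail := by
        rw [show segs1 [] (c :: d :: u) = segs1 [c] (d :: u) by simp [segs1, h],
          segs1_acc (d :: u) [c], segs1_cons_ne d u hd]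
        simp
      have hp1 : partsOf (c :: d :: u) =
          (c :: d :: (segs1 [] u).headI) :: ((segs1 [] u).tail.filter (· ≠ [])) := by
        rw [partsOf, h1]; simp
      have hp2 : partsOf (d :: u) =
          (d :: (segs1 [] u).headI) :: ((segs1 [] u).tail.filter (· ≠ [])) := by
        rw [partsOf, segs1_cons_ne d u hd]; simp
      have htr : trailSl (c :: d :: u) = trailSl (d :: u) := by
        simp [trailSl, hp1, hp2, List.getLast?_cons_cons]
      rw [Pform, Pform, hp1, hp2, htr, joinSl_cons_head c (d :: (segs1 [] u).headI)]
      simp [leadSl, h, hd]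

theorem dropWhile_slash_head (t : List Char) :
    (List.dropWhile (· == '/') t).head? ≠ some '/' := by
  cases ht : List.dropWhile (· == '/') t with
  | nil => simp
  | cons d v =>
    have h2 := List.head?_dropWhile_not (· == '/') t
    rw [ht] at h2
    simp at h2 ⊢
    exact h2

theorem col_eq_P_aux : ∀ (n : Nat) (s : List Char), s.length ≤ n → col s = Pform s := by
  intro n
  induction n with
  | zero =>
    intro s h
    have : s = [] := List.eq_nil_of_length_eq_zero (Nat.le_zero.mp h)
    subst this; rw [col_nil, Pform_nil]
  | succ n ih =>
    intro s h
    match s with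
    | [] => rw [col_nil, Pform_nil]
    | c :: t =>
      by_cases hc : c = '/'
      · subst hc
        rw [show col ('/' :: t) = '/' :: col (t.dropWhile (· == '/')) by simp [col]]
        set u := t.dropWhile (· == '/') with hu
        have hlen : u.length ≤ n := by
          have hdw := List.length_dropWhile_le (· == '/') t
          rw [← hu] at hdw
          simp at h; omega
        rw [ih u hlen]
        have hparts : partsOf ('/' :: t) = partsOf u := by
          rw [parts_cons_slash, hu, parts_dropWhile_slash]
        have hleadu : leadSl u = [] := by
          rw [leadSl, if_neg]
          exact dropWhile_slash_head t
        by_cases hp : partsOf u = []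
        · rw [Pform, Pform, hparts, hp, hleadu]
          simp [leadSl, trailSl, hparts, hp, joinSl_nil]
        · obtain ⟨e0, v0, he0⟩ := List.exists_cons_of_ne_nil hp
          have hune : u ≠ [] := by
            intro hn; rw [hn] at hp; exact hp rfl
          have hlast : ('/' :: t).getLast? = u.getLast? := by
            conv_lhs => rw [show t = List.takeWhile (· == '/') t ++ u by
              rw [hu, List.takeWhile_append_dropWhile]]
            rw [show ('/' :: (List.takeWhile (· == '/') t ++ u)) =
              ('/' :: List.takeWhile (· == '/') t) ++ u from rfl]
            rw [List.getLast?_append]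
            rw [List.getLast?_eq_some_getLast hune]
            rfl
          have htr : trailSl ('/' :: t) = trailSl u := by
            rw [trailSl, trailSl, hparts, hlast]
          rw [Pform, Pform, hparts, htr, hleadu]
          rw [leadSl, if_pos (show ('/' :: t).head? = some '/' from rfl)]
          simp
      · rw [col_cons_ne c t hc, ih t (by simp at h; omega), P_cons_ne c t hc]

theorem col_eq_P (s : List Char) : col s = Pform s := col_eq_P_aux s.length s (le_refl _)

theorem lead_all_slash (s : List Char) : ∀ x ∈ leadSl s, x = '/' := by
  rw [leadSl]; split_ifs <;> simp

theorem trail_all_slash (s : List Char) : ∀ x ∈ trailSl s, x = '/' := by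
  rw [trailSl]; split_ifs <;> simp

theorem join_parts_head (s : List Char) :
    ∀ x, (joinSl (partsOf s)).head? = some x → x ≠ '/' := by
  intro x hx
  cases hp : partsOf s with
  | nil => rw [hp, joinSl_nil] at hx; simp at hx
  | cons e r =>
    have hmem := parts_mem s e (by rw [hp]; simp)
    rw [hp, joinSl_head e hmem.1 r] at hx
    intro he; subst he
    exact hmem.2 (List.mem_of_head? hx)

theorem strip_Pform (s : List Char) :
    PySem.Chars.stripChars (Pform s) ['/'] = joinSl (partsOf s) := by
  rw [Pform]
  exact strip_decor _ _ _ (lead_all_slash s) (trail_all_slash s) (join_parts_head s)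
    (joinSl_getLast (partsOf s) (fun e he => parts_mem s e he))

theorem Pform_eq_slash_iff (s : List Char) :
    Pform s = ['/'] ↔ (partsOf s = [] ∧ '/' ∈ s) := by
  constructor
  · intro hP
    by_cases hp : partsOf s = []
    · refine ⟨hp, ?_⟩
      rw [Pform, hp, joinSl_nil, trailSl, if_neg (by simp [hp])] at hP
      simp only [List.append_nil] at hP
      rw [leadSl] at hP
      split_ifs at hP with hh
      · exact List.mem_of_head? hh
    · exfalso
      obtain ⟨e0, r0, he0⟩ := List.exists_cons_of_ne_nil hp
      have hmem := parts_mem s e0 (by rw [he0]; simp)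
      obtain ⟨x0, hx0⟩ : ∃ x0, e0.head? = some x0 := by
        cases e0 with
        | nil => exact absurd rfl hmem.1
        | cons a b => exact ⟨a, rfl⟩
      have hxs : x0 ≠ '/' := fun he => hmem.2 (he ▸ List.mem_of_head? hx0)
      have hlen := congrArg List.length hP
      rw [Pform, he0] at hlen
      simp at hlen
      have hJlen : 1 ≤ (joinSl (e0 :: r0)).length := by
        have := joinSl_ne_nil e0 hmem.1 r0
        cases hj : joinSl (e0 :: r0) with
        | nil => exact absurd hj this
        | cons a b => simp
      have hL0 : (leadSl s).length = 0 := by omega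
      have hT0 : (trailSl s).length = 0 := by omega
      rw [Pform, he0, List.eq_nil_of_length_eq_zero hL0,
        List.eq_nil_of_length_eq_zero hT0] at hP
      simp only [List.nil_append, List.append_nil] at hP
      have : (joinSl (e0 :: r0)).head? = some '/' := by rw [hP]; rfl
      rw [joinSl_head e0 hmem.1 r0, hx0] at this
      exact hxs (by simpa using this)
  · rintro ⟨hp, hmem⟩
    have hall := (parts_nil_iff s).mp hp
    have hne : s ≠ [] := by intro hn; rw [hn] at hmem; simp at hmem
    obtain ⟨c0, t0, hs0⟩ := List.exists_cons_of_ne_nil hne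
    have hc0 : c0 = '/' := hall c0 (by rw [hs0]; simp)
    rw [Pform, hp, joinSl_nil, trailSl, if_neg (by simp [hp]), leadSl,
      if_pos (by rw [hs0, hc0]; rfl)]
    rfl

theorem singleton_slash_infix (s : List Char) : ['/'] <:+: s ↔ '/' ∈ s := by
  constructor
  · rintro ⟨l1, l2, hl⟩
    rw [← hl]; simp
  · intro hm
    obtain ⟨l1, l2, hl⟩ := List.append_of_mem hm
    exact ⟨l1, l2, by rw [hl]; simp⟩

theorem bodies_eq (p : String) :
    (if collapseSlashes p = "/" then collapseSlashes p
     else ":/" ++ PySem.Str.stripChars (collapseSlashes p) "/" ++ ":") =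
    (if PySem.Str.join "/" (((PySem.Str.split? p "/").getD []).filter (fun seg => seg ≠ "")) = ""
        ∧ PySem.Str.isIn "/" p
     then "/"
     else ":/" ++ PySem.Str.join "/" (((PySem.Str.split? p "/").getD []).filter (fun seg => seg ≠ "")) ++ ":") := by
  have hsplit : ((PySem.Str.split? p "/").getD []) = (segs1 [] p.toList).map String.ofList := by
    rw [PySem.Str.split?, PySem.Chars.split?]
    rw [if_neg (by simp)]
    rw [show ("/" : String).toList = ['/'] from rfl, splitOn_slash]
    rfl
  have hfilter : (((segs1 [] p.toList).map String.ofList).filter (fun seg => seg ≠ "")) =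
      (partsOf p.toList).map String.ofList := by
    rw [partsOf, List.filter_map]
    congr 1
    apply List.filter_congr
    intro x _
    simp only [Function.comp_apply]
    rw [show ("" : String) = String.ofList [] from rfl]
    simp [String.ofList_inj]
  have hjoin : (PySem.Str.join "/" ((partsOf p.toList).map String.ofList)).toList =
      joinSl (partsOf p.toList) := by
    rw [PySem.Str.toList_join, PySem.Chars.join]
    rw [show ("/" : String).toList = ['/'] from rfl]
    rw [List.map_map]
    rw [show (String.toList ∘ String.ofList) = id by funext l; simp]
    simp [joinSl]
  have hA : (collapseSlashes p = "/") ↔ (partsOf p.toList = [] ∧ '/' ∈ p.toList) := by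
    rw [← String.toList_inj, collapse_toList, col_eq_P,
      show ("/" : String).toList = ['/'] from rfl, Pform_eq_slash_iff]
  have hBj : (PySem.Str.join "/" (((PySem.Str.split? p "/").getD []).filter (fun seg => seg ≠ ""))).toList
      = joinSl (partsOf p.toList) := by
    rw [hsplit, hfilter, hjoin]
  have hBcond : (PySem.Str.join "/" (((PySem.Str.split? p "/").getD []).filter (fun seg => seg ≠ "")) = ""
      ∧ PySem.Str.isIn "/" p) ↔ (partsOf p.toList = [] ∧ '/' ∈ p.toList) := by
    constructor
    · rintro ⟨h1, h2⟩
      rw [← String.toList_inj, hBj] at h1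
      constructor
      · by_contra hp
        obtain ⟨e0, r0, he0⟩ := List.exists_cons_of_ne_nil hp
        rw [he0] at h1
        exact joinSl_ne_nil e0 (parts_mem p.toList e0 (by rw [he0]; simp)).1 r0 (by simpa using h1)
      · rw [PySem.Str.isIn_eq, PySem.Chars.isIn_iff_infix,
          show ("/" : String).toList = ['/'] from rfl, singleton_slash_infix] at h2
        exact h2
    · rintro ⟨h1, h2⟩
      constructor
      · rw [← String.toList_inj, hBj, h1, joinSl_nil]; rfl
      · rw [PySem.Str.isIn_eq, PySem.Chars.isIn_iff_infix,
          show ("/" : String).toList = ['/'] from rfl, singleton_slash_infix]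
        exact h2
  by_cases hc : partsOf p.toList = [] ∧ '/' ∈ p.toList
  · rw [if_pos (hA.mpr hc), if_pos (hBcond.mpr hc), hA.mpr hc]
  · rw [if_neg (fun hh => hc (hA.mp hh)), if_neg (fun hh => hc (hBcond.mp hh))]
    rw [← String.toList_inj]
    simp only [String.toList_append]
    rw [hBj]
    rw [PySem.Str.toList_stripChars, collapse_toList, col_eq_P,
      show ("/" : String).toList = ['/'] from rfl, strip_Pform]

-- ===== VERDICT (by name: the statement is the Claim_ definition above) =====
theorem drivePath_spec : Claim_equal_drivePath := by
  intro path _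
  unfold Spec_drivePath drivePath drivePath_alt
  exact bodies_eq (firstColonSplit path)
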